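-- pv_equiv track=rewrite | github.com/chuks-programming-language/releases | benchmarks/bench_stress.py | oop_stress
-- ===== SOURCE A (Python) =====
-- class Vector:
--     def __init__(self, x, y):
--         self.x = x
--         self.y = y
--     def add(self, other):
--         return Vector(self.x + other.x, self.y + other.y)
--     def magnitude_squared(self):
--         return self.x * self.x + self.y * self.y
--
-- def oop_stress(n):
--     total = 0
--     for i in range(n):
--         v1 = Vector(i, i + 1)
--         v2 = Vector(i + 2, i + 3)
--         v3 = v1.add(v2)
--         total += v3.magnitude_squared()
--     return total
-- ===== SOURCE B (Python) =====
-- def oop_stress(n):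
--     # closed form: per-iteration term is (2i+2)^2 + (2i+4)^2 = 8i^2 + 24i + 20
--     if n <= 0:
--         return 0
--     return (4 * n * (n - 1) * (2 * n - 1)) // 3 + 12 * n * (n - 1) + 20 * n
-- ===== Notes on version B (the rewrite author's own statement) =====
-- stated objective: faster
-- what changed: Replaced the O(n) loop summing (2i+2)^2+(2i+4)^2 by the closed-form polynomial using the sum-of-squares and arithmetic-series formulas.
import Mathlib
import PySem

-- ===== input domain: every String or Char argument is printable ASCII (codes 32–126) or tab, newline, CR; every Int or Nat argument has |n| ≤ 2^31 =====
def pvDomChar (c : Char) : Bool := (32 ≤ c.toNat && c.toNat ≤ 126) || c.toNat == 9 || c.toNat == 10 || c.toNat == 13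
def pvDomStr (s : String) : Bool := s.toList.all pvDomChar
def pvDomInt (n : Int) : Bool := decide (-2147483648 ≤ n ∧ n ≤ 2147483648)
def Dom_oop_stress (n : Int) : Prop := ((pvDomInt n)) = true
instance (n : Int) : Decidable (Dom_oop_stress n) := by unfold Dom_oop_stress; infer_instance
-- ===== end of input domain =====

-- B replaces A's loop by a closed-form polynomial sum (objective: faster).

-- ===== PORT A =====
def oop_stress (n : Int) : Int :=
  (PySem.List.pyRange 0 n 1).foldl
    (fun total i =>
      -- v1 = Vector(i, i+1); v2 = Vector(i+2, i+3); v3 = v1.add(v2)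
      let v3 : Int × Int := (i + (i + 2), (i + 1) + (i + 3))
      total + (v3.1 * v3.1 + v3.2 * v3.2)) 0

-- ===== PORT B =====
def oop_stress_alt (n : Int) : Int :=
  if n ≤ 0 then 0
  else PySem.Int.floordiv (4 * n * (n - 1) * (2 * n - 1)) 3 + 12 * n * (n - 1) + 20 * n

-- ===== PRECONDITION & SPEC =====
def Spec_oop_stress (n : Int) (out : Int) : Prop := out = oop_stress_alt n
instance (n : Int) (out : Int) : Decidable (Spec_oop_stress n out) := by unfold Spec_oop_stress; infer_instance

-- ===== CLAIM (what is proved, stated in full; the proofs are below) =====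
def Claim_equal_oop_stress : Prop := ∀ (n : Int), Dom_oop_stress n → Spec_oop_stress n (oop_stress n)

-- ===== LEMMAS AND PROOFS =====

-- Three times A's fold (from any initial accumulator) is a division-free polynomial.
theorem oop_stress_fold_mul_three (k : ℕ) (init : Int) :
    3 * ((PySem.List.pyRange 0 (k : Int) 1).foldl
      (fun total i =>
        let v3 : Int × Int := (i + (i + 2), (i + 1) + (i + 3))
        total + (v3.1 * v3.1 + v3.2 * v3.2)) init)
    = 3 * init + 8 * (k : Int) ^ 3 + 24 * (k : Int) ^ 2 + 28 * (k : Int) := by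
  induction k generalizing init with
  | zero => simp [PySem.List.pyRange_one_eq_nil]
  | succ m ih =>
    have h : (0 : Int) ≤ (m : Int) := Int.natCast_nonneg m
    rw [show ((m + 1 : ℕ) : Int) = (m : Int) + 1 by push_cast; ring,
        PySem.List.pyRange_one_succ_right h, List.foldl_append]
    simp only [List.foldl_cons, List.foldl_nil]
    have h2 := ih init
    push_cast at h2 ⊢
    linear_combination h2

-- 3 divides 4n(n-1)(2n-1) for every integer n.
theorem three_dvd_poly (n : Int) : (3 : Int) ∣ 4 * n * (n - 1) * (2 * n - 1) := by
  have hr : n % 3 = 0 ∨ n % 3 = 1 ∨ n % 3 = 2 := by omega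
  rcases hr with h | h | h
  · obtain ⟨q, hq⟩ : ∃ q, n = 3 * q := ⟨n / 3, by omega⟩
    exact ⟨4 * q * (3 * q - 1) * (6 * q - 1), by rw [hq]; ring⟩
  · obtain ⟨q, hq⟩ : ∃ q, n = 3 * q + 1 := ⟨n / 3, by omega⟩
    exact ⟨4 * (3 * q + 1) * q * (6 * q + 1), by rw [hq]; ring⟩
  · obtain ⟨q, hq⟩ : ∃ q, n = 3 * q + 2 := ⟨n / 3, by omega⟩
    exact ⟨4 * (3 * q + 2) * (3 * q + 1) * (2 * q + 1), by rw [hq]; ring⟩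

theorem oop_stress_spec : Claim_equal_oop_stress := by
  intro n _
  unfold Spec_oop_stress oop_stress oop_stress_alt
  by_cases hn : n ≤ 0
  · simp [hn, PySem.List.pyRange_one_eq_nil hn]
  · simp only [if_neg hn]
    have hpos : 0 < n := by omega
    have hk : ((n.toNat : ℕ) : Int) = n := Int.toNat_of_nonneg (le_of_lt hpos)
    have hfold := oop_stress_fold_mul_three n.toNat 0
    rw [hk] at hfold
    obtain ⟨c, hc⟩ := three_dvd_poly n
    have hfd : PySem.Int.floordiv (4 * n * (n - 1) * (2 * n - 1)) 3 = c := by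
      rw [PySem.Int.floordiv_eq_ediv_of_pos (by norm_num), hc]
      exact Int.mul_ediv_cancel_left c (by norm_num)
    rw [hfd]
    have : 3 * ((PySem.List.pyRange 0 n 1).foldl
        (fun total i =>
          let v3 : Int × Int := (i + (i + 2), (i + 1) + (i + 3))
          total + (v3.1 * v3.1 + v3.2 * v3.2)) 0)
        = 3 * (c + 12 * n * (n - 1) + 20 * n) := by
      linear_combination hfold + hc
    linarith [this]
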